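-- pv_equiv track=rewrite | github.com/big-unibo/llm4dfm-develop | llm4dfm/pipeline/metrics.py | has_extra_tags
-- ===== SOURCE A (Python) =====
-- def has_extra_tags(graph_gt, graph_out):
--     roles_gt = set()
--     roles_out = set()
--
--     for edge in graph_gt:
--         if 'role' in edge and edge['role'].lower() not in roles_gt:
--             roles_gt.add(edge['role'].lower())
--
--     for edge in graph_out:
--         if 'role' in edge and edge['role'].lower() not in roles_out:
--             roles_out.add(edge['role'].lower())
--
--     return len(roles_out) > len(roles_out & roles_gt)
-- ===== SOURCE B (Python) =====
-- def has_extra_tags(graph_gt, graph_out):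
--     for edge in graph_out:
--         if 'role' not in edge:
--             continue
--         r = edge['role'].lower()
--         if not any('role' in e and e['role'].lower() == r for e in graph_gt):
--             return True
--     return False
-- ===== Notes on version B (the rewrite author's own statement) =====
-- stated objective: alternative
-- what changed: B uses no sets at all: it scans graph_out once and, for each role it meets, checks directly by a nested scan of graph_gt whether any ground-truth edge carries the same lowercased role, returning True at the first unmatched role; A builds two deduplicated sets and compares the out-set size with the size of its intersection with the gt-set.
import Mathlib
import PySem

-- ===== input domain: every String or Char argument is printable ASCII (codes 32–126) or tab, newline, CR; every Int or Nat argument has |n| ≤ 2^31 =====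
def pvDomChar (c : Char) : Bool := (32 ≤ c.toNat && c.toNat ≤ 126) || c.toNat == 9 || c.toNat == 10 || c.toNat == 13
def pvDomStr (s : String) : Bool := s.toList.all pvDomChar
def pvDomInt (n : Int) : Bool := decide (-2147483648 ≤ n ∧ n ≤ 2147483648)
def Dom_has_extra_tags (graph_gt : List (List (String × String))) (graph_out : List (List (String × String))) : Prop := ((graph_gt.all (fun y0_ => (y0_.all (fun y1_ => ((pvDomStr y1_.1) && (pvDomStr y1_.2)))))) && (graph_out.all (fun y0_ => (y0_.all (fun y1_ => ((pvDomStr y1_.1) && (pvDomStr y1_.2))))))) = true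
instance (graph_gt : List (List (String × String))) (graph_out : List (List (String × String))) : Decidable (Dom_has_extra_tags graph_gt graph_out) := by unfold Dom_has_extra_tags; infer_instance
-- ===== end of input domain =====

-- B replaces A's two role sets and the size-of-intersection comparison by a set-free
-- nested scan of graph_gt with an early exit (objective: alternative, no speed claim).

-- ===== PORT A =====
-- A: collect lowercased roles of both graphs into two sets, compare |roles_out| with |roles_out ∩ roles_gt|.
def pvRolesA (g : List (List (String × String))) : PySem.Set String :=
  g.foldl (fun s edge =>
    match (PySem.Dict.mk edge).get? "role" with
    | none => s
    | some v => if PySem.Set.contains s (PySem.Str.lower v) then s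
                else PySem.Set.add s (PySem.Str.lower v)) PySem.Set.empty

def has_extra_tags (graph_gt : List (List (String × String))) (graph_out : List (List (String × String))) : Bool :=
  let roles_gt := pvRolesA graph_gt
  let roles_out := pvRolesA graph_out
  decide (PySem.Set.len roles_out > PySem.Set.len (PySem.Set.inter roles_out roles_gt))

-- ===== PORT B =====
-- B: no sets — for each edge of graph_out carrying a role, scan graph_gt for an edge with the
-- same lowercased role; True at the first role with no match, False after the loop.
def has_extra_tags_alt (graph_gt : List (List (String × String))) (graph_out : List (List (String × String))) : Bool :=
  graph_out.any (fun edge =>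
    match (PySem.Dict.mk edge).get? "role" with
    | none => false
    | some v =>
      let r := PySem.Str.lower v
      !(graph_gt.any (fun e =>
        match (PySem.Dict.mk e).get? "role" with
        | none => false
        | some w => PySem.Str.lower w == r)))

-- ===== PRECONDITION & SPEC =====
def Spec_has_extra_tags (graph_gt : List (List (String × String))) (graph_out : List (List (String × String))) (out : Bool) : Prop := out = has_extra_tags_alt graph_gt graph_out
instance (graph_gt : List (List (String × String))) (graph_out : List (List (String × String))) (out : Bool) : Decidable (Spec_has_extra_tags graph_gt graph_out out) := by unfold Spec_has_extra_tags; infer_instance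

-- ===== CLAIM (what is proved, stated in full; the proofs are below) =====
def Claim_equal_has_extra_tags : Prop := ∀ (graph_gt : List (List (String × String))) (graph_out : List (List (String × String))), Dom_has_extra_tags graph_gt graph_out → Spec_has_extra_tags graph_gt graph_out (has_extra_tags graph_gt graph_out)

-- ===== LEMMAS AND PROOFS =====

-- membership characterisation of A's role set
theorem mem_pvRolesA_foldl (l : List (List (String × String))) (acc : PySem.Set String) (x : String) :
    (x ∈ l.foldl (fun s edge =>
      match (PySem.Dict.mk edge).get? "role" with
      | none => s
      | some v => if PySem.Set.contains s (PySem.Str.lower v) then s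
                  else PySem.Set.add s (PySem.Str.lower v)) acc)
    ↔ x ∈ acc ∨ ∃ e ∈ l, ∃ v, (PySem.Dict.mk e).get? "role" = some v ∧ PySem.Str.lower v = x := by
  induction l generalizing acc with
  | nil => simp
  | cons e t ih =>
    simp only [List.foldl_cons, ih, List.mem_cons]
    cases h : (PySem.Dict.mk e).get? "role" with
    | none =>
      constructor
      · rintro (ha | ⟨e', he', v, hv, hl⟩)
        · exact Or.inl ha
        · exact Or.inr ⟨e', Or.inr he', v, hv, hl⟩
      · rintro (ha | ⟨e', (rfl | he'), v, hv, hl⟩)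
        · exact Or.inl ha
        · rw [h] at hv; cases hv
        · exact Or.inr ⟨e', he', v, hv, hl⟩
    | some v0 =>
      have hmem : x ∈ (if PySem.Set.contains acc (PySem.Str.lower v0) then acc
            else PySem.Set.add acc (PySem.Str.lower v0)) ↔ x ∈ acc ∨ x = PySem.Str.lower v0 := by
        split
        · next hc =>
          constructor
          · exact Or.inl
          · rintro (ha | rfl)
            · exact ha
            · simpa [PySem.Set.contains] using hc
        · rw [PySem.Set.mem_add]
      simp only [hmem]
      constructor
      · rintro ((ha | rfl) | ⟨e', he', v, hv, hl⟩)
        · exact Or.inl ha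
        · exact Or.inr ⟨e, Or.inl rfl, v0, h, rfl⟩
        · exact Or.inr ⟨e', Or.inr he', v, hv, hl⟩
      · rintro (ha | ⟨e', (rfl | he'), v, hv, hl⟩)
        · exact Or.inl (Or.inl ha)
        · rw [h] at hv; cases hv; exact Or.inl (Or.inr hl.symm)
        · exact Or.inr ⟨e', he', v, hv, hl⟩

theorem mem_pvRolesA (g : List (List (String × String))) (x : String) :
    x ∈ pvRolesA g ↔ ∃ e ∈ g, ∃ v, (PySem.Dict.mk e).get? "role" = some v ∧ PySem.Str.lower v = x := by
  unfold pvRolesA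
  rw [mem_pvRolesA_foldl]
  simp [PySem.Set.empty]

-- ===== VERDICT (by name: the statement is the Claim_ definition above) =====
theorem has_extra_tags_spec : Claim_equal_has_extra_tags := by
  intro graph_gt graph_out _
  unfold Spec_has_extra_tags has_extra_tags has_extra_tags_alt
  rw [Bool.eq_iff_iff]
  simp only [decide_eq_true_eq, List.any_eq_true]
  rw [PySem.Set.len, PySem.Set.len, PySem.Set.inter]
  constructor
  · intro hlt
    have : ∃ x ∈ pvRolesA graph_out, ¬ (PySem.Set.contains (pvRolesA graph_gt) x = true) := by
      by_contra hall
      push Not at hall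
      have : (List.filter (fun a => PySem.Set.contains (pvRolesA graph_gt) a) (pvRolesA graph_out)).length = (pvRolesA graph_out).length := by
        rw [List.length_filter_eq_length_iff]
        intro a ha
        exact hall a ha
      omega
    obtain ⟨x, hx, hnx⟩ := this
    rw [mem_pvRolesA] at hx
    obtain ⟨e, he, v, hv, hl⟩ := hx
    refine ⟨e, he, ?_⟩
    rw [hv]
    simp only [Bool.not_eq_true', List.any_eq_false]
    intro e' he'
    cases hw : (PySem.Dict.mk e').get? "role" with
    | none => simp
    | some w =>
      intro heq
      apply hnx
      have hxg : x ∈ pvRolesA graph_gt := (mem_pvRolesA _ _).mpr ⟨e', he', w, hw, by rw [eq_of_beq heq, hl]⟩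
      simpa [PySem.Set.contains] using hxg
  · rintro ⟨e, he, hp⟩
    cases hv : (PySem.Dict.mk e).get? "role" with
    | none => rw [hv] at hp; cases hp
    | some v =>
      rw [hv] at hp
      simp only [Bool.not_eq_true', List.any_eq_false] at hp
      have hx : PySem.Str.lower v ∈ pvRolesA graph_out := (mem_pvRolesA _ _).mpr ⟨e, he, v, hv, rfl⟩
      have hnx : ¬ (PySem.Set.contains (pvRolesA graph_gt) (PySem.Str.lower v) = true) := by
        intro hc
        have hxg : PySem.Str.lower v ∈ pvRolesA graph_gt := by simpa [PySem.Set.contains] using hc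
        rw [mem_pvRolesA] at hxg
        obtain ⟨e', he', w, hw, hl⟩ := hxg
        have := hp e' he'
        rw [hw] at this
        exact (by simpa using this : PySem.Str.lower w ≠ PySem.Str.lower v) hl
      have hle := List.length_filter_le (fun a => PySem.Set.contains (pvRolesA graph_gt) a) (pvRolesA graph_out)
      rcases lt_or_eq_of_le hle with h | h
      · exact_mod_cast h
      · exfalso
        exact hnx ((List.length_filter_eq_length_iff.mp h) _ hx)
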